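-- pv_equiv track=rewrite | github.com/YUMZII/CodingTest_Python | 프로그래머스/0/181880. 1로 만들기/1로 만들기.py | solution
-- ===== SOURCE A (Python) =====
-- def solution(num_list):
--     count = 0
--     for i in num_list :
--         while i != 1 :
--             if i%2==0 :
--                 i = int(i/2)
--             else :
--                 i = int((i-1)/2)
--             count += 1
--     return count
-- ===== SOURCE B (Python) =====
-- def solution(num_list):
--     total = 0
--     for n in num_list:
--         p = 1
--         steps = 0
--         while p * 2 <= n:
--             p *= 2
--             steps += 1
--         total += steps
--     return total
-- ===== Notes on version B (the rewrite author's own statement) =====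
-- stated objective: alternative
-- what changed: Per element, instead of repeatedly halving the value and counting reductions until it reaches 1, B grows a power of two upward (doubling p while p*2 <= n) and counts the doublings, summing the counts; Pre_ restricts to lists of positive integers, since A loops forever on any element <= 0.
import Mathlib
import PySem

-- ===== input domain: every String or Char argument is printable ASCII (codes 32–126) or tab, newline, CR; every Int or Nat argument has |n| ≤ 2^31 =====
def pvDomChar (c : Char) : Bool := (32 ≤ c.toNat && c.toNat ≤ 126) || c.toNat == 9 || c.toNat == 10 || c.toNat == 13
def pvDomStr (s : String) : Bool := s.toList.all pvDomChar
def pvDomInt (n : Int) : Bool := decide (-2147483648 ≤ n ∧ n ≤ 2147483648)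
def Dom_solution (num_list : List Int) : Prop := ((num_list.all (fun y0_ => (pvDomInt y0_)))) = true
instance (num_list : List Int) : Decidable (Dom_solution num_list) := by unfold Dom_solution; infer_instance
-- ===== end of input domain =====

-- B counts halving steps by doubling a power of two upward instead of reducing the value; same cost, different decomposition.

-- ===== PORT A =====
-- inner while loop of A; on positive i, int(i/2) and int((i-1)/2) are exact integer
-- floor divisions, ported as Int `/` (floor = truncation for nonnegative operands).
-- For i ≤ 0 Python loops forever (excluded by Pre_); the guard only makes the port total.
def solution_loop (i count : Int) : Int :=
  if i = 1 then count
  else if _h : i ≤ 0 then count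
  else solution_loop (if i % 2 = 0 then i / 2 else (i - 1) / 2) (count + 1)
termination_by i.toNat
decreasing_by
  split <;> omega

def solution (num_list : List Int) : Int :=
  num_list.foldl (fun count i => solution_loop i count) 0

-- ===== PORT B =====
-- inner while loop of B; the invariant 1 ≤ p is carried as a proof argument so that
-- the loop terminates by the measure (n - p).toNat.
def solution_alt_loop (n p steps : Int) (hp : 1 ≤ p) : Int :=
  if _h : p * 2 ≤ n then solution_alt_loop n (p * 2) (steps + 1) (by omega) else steps
termination_by (n - p).toNat
decreasing_by omega

def solution_alt (num_list : List Int) : Int :=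
  num_list.foldl (fun total n => total + solution_alt_loop n 1 0 (by norm_num)) 0

-- ===== PRECONDITION & SPEC =====
-- Pre_ excludes lists containing an element ≤ 0: A's while loop never terminates there.
def Pre_solution (num_list : List Int) : Prop := ∀ n ∈ num_list, 1 ≤ n
instance (num_list : List Int) : Decidable (Pre_solution num_list) := by unfold Pre_solution; infer_instance
def pvWitness_solution : List Int := ([1, 2, 7, 12])

def Spec_solution (num_list : List Int) (out : Int) : Prop := out = solution_alt num_list
instance (num_list : List Int) (out : Int) : Decidable (Spec_solution num_list out) := by unfold Spec_solution; infer_instance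

-- ===== CLAIM (what is proved, stated in full; the proofs are below) =====
def Claim_equal_solution : Prop := ∀ (num_list : List Int), Dom_solution num_list → Pre_solution num_list → Spec_solution num_list (solution num_list)

-- ===== LEMMAS AND PROOFS =====

-- A's loop adds ⌊log₂ i⌋ to the accumulator.
theorem aloop_eq (i count : Int) (hi : 1 ≤ i) :
    solution_loop i count = count + Nat.log 2 i.toNat := by
  by_cases h1 : i = 1
  · subst h1; rw [solution_loop]; simp
  · have h2 : 2 ≤ i := by omega
    rw [solution_loop, if_neg h1, dif_neg (by omega : ¬ i ≤ 0)]
    have hj : (if i % 2 = 0 then i / 2 else (i - 1) / 2) = i / 2 := by split <;> omega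
    rw [hj, aloop_eq (i / 2) (count + 1) (by omega)]
    have ht : (i / 2).toNat = i.toNat / 2 := by omega
    rw [ht]
    have hl := Nat.log_div_base 2 i.toNat
    have hpos : 0 < Nat.log 2 i.toNat := Nat.log_pos (by norm_num) (by omega)
    omega
termination_by i.toNat
decreasing_by omega

-- B's loop adds ⌊log₂ (n / p)⌋ to the step counter.
theorem bloop_eq (n p steps : Int) (hp : 1 ≤ p) :
    solution_alt_loop n p steps hp = steps + Nat.log 2 (n.toNat / p.toNat) := by
  rw [solution_alt_loop]
  split
  case isTrue h =>
    rw [bloop_eq n (p * 2) (steps + 1) (by omega)]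
    have h2 : (p * 2).toNat = p.toNat * 2 := by omega
    have hdd : n.toNat / (p.toNat * 2) = n.toNat / p.toNat / 2 := by
      rw [Nat.div_div_eq_div_mul]
    have hge : 2 ≤ n.toNat / p.toNat :=
      (Nat.le_div_iff_mul_le (by omega)).mpr (by omega)
    have hl := Nat.log_div_base 2 (n.toNat / p.toNat)
    have hpos : 0 < Nat.log 2 (n.toNat / p.toNat) := Nat.log_pos (by norm_num) hge
    rw [h2, hdd]
    omega
  case isFalse h =>
    have hlt : n.toNat / p.toNat < 2 := (Nat.div_lt_iff_lt_mul (by omega)).mpr (by omega)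
    have : Nat.log 2 (n.toNat / p.toNat) = 0 := Nat.log_eq_zero_iff.mpr (Or.inl hlt)
    omega
termination_by (n - p).toNat
decreasing_by omega

-- the two folds agree element by element, for any common accumulator.
theorem foldl_eq (l : List Int) (acc : Int) (h : ∀ n ∈ l, 1 ≤ n) :
    l.foldl (fun count i => solution_loop i count) acc
      = l.foldl (fun total n => total + solution_alt_loop n 1 0 (by norm_num)) acc := by
  induction l generalizing acc with
  | nil => rfl
  | cons x xs ih =>
    simp only [List.foldl_cons]
    rw [aloop_eq x acc (h x (by simp)), bloop_eq]
    simp only [Int.toNat_one, Nat.div_one, zero_add]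
    exact ih _ (fun n hn => h n (by simp [hn]))

-- ===== VERDICT (by name: the statement is the Claim_ definition above) =====
theorem solution_spec : Claim_equal_solution := by
  intro num_list _ hpre
  unfold Spec_solution solution solution_alt
  exact foldl_eq num_list 0 hpre
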